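-- pv_equiv track=rewrite | github.com/n8patterson/group-project-1 | .ipynb_checkpoints/parse_tweet_response-checkpoint.py | select_text
-- ===== SOURCE A (Python) =====
-- def select_text(tweets):
--     ''' Assigns the main text to only one column depending
--         on whether the tweet is a RT/quote or not'''
--
--     tweets_list = []
--
--     # Iterate through each tweet
--     for tweet_obj in tweets:
--
--         if 'retweeted_status-extended_tweet-full_text' in tweet_obj:
--             tweet_obj['text'] = \
--                 tweet_obj['retweeted_status-extended_tweet-full_text']
--
--         elif 'retweeted_status-text' in tweet_obj:
--             tweet_obj['text'] = tweet_obj['retweeted_status-text']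
--
--         elif 'extended_tweet-full_text' in tweet_obj:
--             tweet_obj['text'] = tweet_obj['extended_tweet-full_text']
--
--         tweets_list.append(tweet_obj)
--
--     return tweets_list
-- ===== SOURCE B (Python) =====
-- def select_text(tweets):
--     tweets_list = list(tweets)
--     # Staged overwrite passes: apply the lowest-priority key first; each later
--     # pass overwrites 'text' where its key is present, so after the last pass
--     # 'text' holds the value of the highest-priority key present (if any).
--     for key in ('extended_tweet-full_text',
--                 'retweeted_status-text',
--                 'retweeted_status-extended_tweet-full_text'):
--         for tweet_obj in tweets_list:
--             if key in tweet_obj: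
--                 tweet_obj['text'] = tweet_obj[key]
--     return tweets_list
-- ===== Notes on version B (the rewrite author's own statement) =====
-- stated objective: alternative
-- what changed: Replaces A's per-item if/elif first-match chain by three whole-list staged overwrite passes applied in reverse priority order, so the last pass that fires wins instead of the first branch that matches.
import Mathlib
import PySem

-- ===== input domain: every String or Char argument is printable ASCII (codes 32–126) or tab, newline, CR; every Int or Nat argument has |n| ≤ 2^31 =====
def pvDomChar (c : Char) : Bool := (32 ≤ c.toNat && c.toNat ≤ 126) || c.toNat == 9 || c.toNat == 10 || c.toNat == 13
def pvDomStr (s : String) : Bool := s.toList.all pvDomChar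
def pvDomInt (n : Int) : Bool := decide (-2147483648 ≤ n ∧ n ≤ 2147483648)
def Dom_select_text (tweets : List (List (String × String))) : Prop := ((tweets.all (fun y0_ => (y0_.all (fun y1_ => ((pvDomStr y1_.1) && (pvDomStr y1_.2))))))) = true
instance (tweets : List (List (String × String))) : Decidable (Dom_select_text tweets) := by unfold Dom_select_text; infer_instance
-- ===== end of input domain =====

-- B replaces A's per-item if/elif chain by three staged whole-list overwrite passes in
-- reverse priority order (alternative decomposition, same cost). A mutates each tweet
-- dict in place and returns the same objects; B performs the same mutation; the
-- equivalence proved here is about the returned value.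

-- ===== PORT A =====
-- if/elif chain over the three keys; getD's default is unreachable (guarded by contains).
def pvSelA (d : PySem.Dict String String) : PySem.Dict String String :=
  if d.contains "retweeted_status-extended_tweet-full_text" then
    d.insert "text" (d.getD "retweeted_status-extended_tweet-full_text" "")
  else if d.contains "retweeted_status-text" then
    d.insert "text" (d.getD "retweeted_status-text" "")
  else if d.contains "extended_tweet-full_text" then
    d.insert "text" (d.getD "extended_tweet-full_text" "")
  else d

def select_text (tweets : List (List (String × String))) : List (List (String × String)) :=
  tweets.foldl (fun acc t => acc ++ [(pvSelA (PySem.Dict.ofList t)).items]) []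

-- ===== PORT B =====
-- one overwrite pass for one key: set 'text' from that key wherever it is present
def pvStep (k : String) (d : PySem.Dict String String) : PySem.Dict String String :=
  if d.contains k then d.insert "text" (d.getD k "") else d

-- outer loop over the keys in reverse priority order, each iterating over the whole list
def select_text_alt (tweets : List (List (String × String))) : List (List (String × String)) :=
  ((["extended_tweet-full_text", "retweeted_status-text",
     "retweeted_status-extended_tweet-full_text"].foldl
      (fun ds k => ds.map (pvStep k)) (tweets.map PySem.Dict.ofList)).map (·.items))

-- ===== PRECONDITION & SPEC =====
def Spec_select_text (tweets : List (List (String × String))) (out : List (List (String × String))) : Prop := out = select_text_alt tweets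
instance (tweets : List (List (String × String))) (out : List (List (String × String))) : Decidable (Spec_select_text tweets out) := by unfold Spec_select_text; infer_instance

-- ===== CLAIM =====
def Claim_equal_select_text : Prop := ∀ (tweets : List (List (String × String))), Dom_select_text tweets → Spec_select_text tweets (select_text tweets)

-- ===== LEMMAS AND PROOFS =====
theorem ins_ins {κ ν : Type} [BEq κ] [LawfulBEq κ] (d : PySem.Dict κ ν) (k : κ) (v w : ν) :
    (d.insert k v).insert k w = d.insert k w := by
  apply PySem.Dict.ext
  rw [PySem.Dict.items_insert, PySem.Dict.items_insert, PySem.Dict.items_insert]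
  rw [PySem.Dict.contains_insert_self]
  simp only [if_true]
  by_cases h : d.contains k
  · simp only [h, if_true, List.map_map]
    apply List.map_congr_left
    intro p _
    by_cases hp : p.1 == k <;> simp [hp]
  · simp only [h, if_false, Bool.false_eq_true, List.map_append]
    congr 1
    · nth_rewrite 2 [← List.map_id d.items]
      apply List.map_congr_left
      intro p hp
      have hne : (p.1 == k) = false := by
        by_contra hc
        have hpe : p.1 = k := eq_of_beq (by revert hc; cases (p.1 == k) <;> simp)
        have hmem : k ∈ d.keys := by
          have : p.1 ∈ d.items.map (·.1) := List.mem_map.mpr ⟨p, hp, rfl⟩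
          simpa [PySem.Dict.keys, hpe] using this
        have : d.contains k = true := (PySem.Dict.contains_iff_mem_keys d k).mpr hmem
        simp [this] at h
      simp [hne]
    · simp

theorem pvSel_eq (d : PySem.Dict String String) :
    pvStep "retweeted_status-extended_tweet-full_text"
      (pvStep "retweeted_status-text" (pvStep "extended_tweet-full_text" d)) = pvSelA d := by
  unfold pvSelA pvStep
  by_cases h1 : d.contains "retweeted_status-extended_tweet-full_text" <;>
    by_cases h2 : d.contains "retweeted_status-text" <;>
      by_cases h3 : d.contains "extended_tweet-full_text" <;>
        simp [h1, h2, h3, PySem.Dict.contains_insert, PySem.Dict.getD_insert_of_ne, ins_ins]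

theorem selA_foldl (tweets : List (List (String × String))) :
    tweets.foldl (fun acc t => acc ++ [(pvSelA (PySem.Dict.ofList t)).items]) [] =
      tweets.map (fun t => (pvSelA (PySem.Dict.ofList t)).items) := by
  induction tweets using List.reverseRecOn with
  | nil => rfl
  | append_singleton xs x ih => rw [List.foldl_append, List.map_append, ih]; rfl

-- ===== VERDICT =====
theorem select_text_spec : Claim_equal_select_text := by
  intro tweets _
  show select_text tweets = select_text_alt tweets
  unfold select_text select_text_alt
  rw [selA_foldl]
  simp only [List.foldl, List.map_map]
  apply List.map_congr_left
  intro t _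
  simp [Function.comp, pvSel_eq]
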